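-- pv_equiv track=rewrite | github.com/suckoja/static-site-generator | src/spiltor.py | find_first_occurring_substring
-- ===== SOURCE A (Python) =====
-- def find_first_occurring_substring(main_string, target_substrings):
--     min_index = float('inf')
--     first_found_substring = None
--
--     for target in target_substrings:
--         index = main_string.find(target)
--         if index != -1 and index < min_index:
--             min_index = index
--             first_found_substring = target
--
--     return first_found_substring
-- ===== SOURCE B (Python) =====
-- def find_first_occurring_substring(main_string, target_substrings):
--     # Position-major scan: walk the haystack left to right; at the first
--     # position where any target matches, return the first matching target
--     # in list order (same earliest-occurrence, list-order tie-break as A).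
--     for i in range(len(main_string) + 1):
--         for target in target_substrings:
--             if main_string.startswith(target, i):
--                 return target
--     return None
-- ===== Notes on version B (the rewrite author's own statement) =====
-- stated objective: faster
-- what changed: Pattern-major min-index tracking (a full .find over the haystack for every target) replaced by a single position-major scan that stops at the earliest position where any target matches, keeping the list-order tie-break.
import Mathlib
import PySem

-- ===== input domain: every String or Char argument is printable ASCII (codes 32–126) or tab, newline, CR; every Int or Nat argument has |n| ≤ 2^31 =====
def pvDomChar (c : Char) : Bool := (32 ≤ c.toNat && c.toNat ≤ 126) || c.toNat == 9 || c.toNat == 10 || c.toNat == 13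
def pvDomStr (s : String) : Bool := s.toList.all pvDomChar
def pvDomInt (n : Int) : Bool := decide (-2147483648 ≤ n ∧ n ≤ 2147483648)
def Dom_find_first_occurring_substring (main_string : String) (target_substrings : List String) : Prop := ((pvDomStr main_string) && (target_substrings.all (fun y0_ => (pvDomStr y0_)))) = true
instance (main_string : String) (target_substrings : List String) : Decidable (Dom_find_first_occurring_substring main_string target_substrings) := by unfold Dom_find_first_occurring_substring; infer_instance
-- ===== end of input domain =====

-- B replaces A's pattern-major min-index tracking (one .find per target) by a
-- position-major left-to-right scan of the haystack returning the first target
-- matching at the earliest position; alternative decomposition, same result.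


-- ===== PORT A =====
-- Loop body of A; state = (min_index, first_found_substring), none in the first
-- component stands for float('inf'), none in the second for Python's None.
def ffoStep (main_string : String) (st : Option Int × Option String) (target : String) : Option Int × Option String :=
  let index := PySem.Str.find main_string target
  if (index != -1 && (match st.1 with | none => true | some m => decide (index < m))) then
    (some index, some target)
  else st

def find_first_occurring_substring (main_string : String) (target_substrings : List String) : Option String :=
  (target_substrings.foldl (ffoStep main_string) (none, none)).2

-- ===== PORT B =====
-- inner Python loop 'for target in ...: if main_string.startswith(target, i): return target'
-- = first matching target; startswith(target, i) for 0 ≤ i ≤ len(main_string) is exactly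
-- startswith on the i-th suffix (Python reads the start argument with slice semantics).
def ffoScan (s : List Char) (ts : List String) : List Nat → Option String
  | [] => none
  | i :: rest =>
    match ts.find? (fun t => PySem.Chars.startswith (s.drop i) t.toList) with
    | some t => some t
    | none => ffoScan s ts rest

def find_first_occurring_substring_alt (main_string : String) (target_substrings : List String) : Option String :=
  ffoScan main_string.toList target_substrings (List.range (main_string.toList.length + 1))

-- ===== PRECONDITION & SPEC =====
def Spec_find_first_occurring_substring (main_string : String) (target_substrings : List String) (out : Option String) : Prop := out = find_first_occurring_substring_alt main_string target_substrings
instance (main_string : String) (target_substrings : List String) (out : Option String) : Decidable (Spec_find_first_occurring_substring main_string target_substrings out) := by unfold Spec_find_first_occurring_substring; infer_instance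

-- ===== CLAIM (what is proved, stated in full; the proofs are below) =====
def Claim_equal_find_first_occurring_substring : Prop := ∀ (main_string : String) (target_substrings : List String), Dom_find_first_occurring_substring main_string target_substrings → Spec_find_first_occurring_substring main_string target_substrings (find_first_occurring_substring main_string target_substrings)

-- ===== LEMMAS AND PROOFS =====

-- Proof-side characterisation: the first target (list order) with minimal
-- find-index, none if no target occurs.
def ffoMin (s : List Char) : List String → Option (Int × String)
  | [] => none
  | t :: ts =>
    let i := PySem.Chars.find s t.toList
    match ffoMin s ts with
    | none => if i = -1 then none else some (i, t)
    | some (m, f) => if i = -1 then some (m, f) else if i ≤ m then some (i, t) else some (m, f)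

theorem foldl_ffoStep_some (main : String) (ts : List String) (m₀ : Int) (f₀ : String) :
    ts.foldl (ffoStep main) (some m₀, some f₀) =
      match ffoMin main.toList ts with
      | some (m, f) => if m < m₀ then (some m, some f) else (some m₀, some f₀)
      | none => (some m₀, some f₀) := by
  induction ts generalizing m₀ f₀ with
  | nil => rfl
  | cons t ts ih =>
    have hstep : ffoStep main (some m₀, some f₀) t =
        if (PySem.Chars.find main.toList t.toList ≠ -1 ∧ PySem.Chars.find main.toList t.toList < m₀)
        then (some (PySem.Chars.find main.toList t.toList), some t) else (some m₀, some f₀) := by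
      simp only [ffoStep, PySem.Str.find_eq]
      split_ifs <;> first | rfl | (exfalso; simp_all [bne_iff_ne]) | (exfalso; simp_all [bne_iff_ne]; omega)
    rw [List.foldl_cons, hstep]
    have hge := PySem.Chars.neg_one_le_find main.toList t.toList
    split_ifs with hc
    · rw [ih]
      cases hm : ffoMin main.toList ts with
      | none =>
        simp only [ffoMin, hm]
        split_ifs <;> first | rfl | (simp_all; done) | (simp_all; omega) | (exfalso; omega)
      | some p =>
        rcases p with ⟨m, f⟩
        simp only [ffoMin, hm]
        split_ifs <;> first | rfl | (simp_all; done) | (simp_all; omega) | (exfalso; omega)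
    · rw [ih]
      cases hm : ffoMin main.toList ts with
      | none =>
        simp only [ffoMin, hm]
        split_ifs <;> first | rfl | (simp_all; done) | (simp_all; omega) | (exfalso; omega)
      | some p =>
        rcases p with ⟨m, f⟩
        simp only [ffoMin, hm]
        split_ifs <;> first | rfl | (simp_all; done) | (simp_all; omega) | (exfalso; omega)

theorem foldl_ffoStep_none (main : String) (ts : List String) :
    ts.foldl (ffoStep main) (none, none) =
      match ffoMin main.toList ts with
      | some (m, f) => (some m, some f)
      | none => (none, none) := by
  induction ts with
  | nil => rfl
  | cons t ts ih =>
    have hstep : ffoStep main ((none : Option Int), (none : Option String)) t =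
        if PySem.Chars.find main.toList t.toList ≠ -1
        then (some (PySem.Chars.find main.toList t.toList), some t) else (none, none) := by
      simp only [ffoStep, PySem.Str.find_eq]
      split_ifs <;> first | rfl | (exfalso; simp_all [bne_iff_ne]) | (exfalso; simp_all [bne_iff_ne]; omega)
    rw [List.foldl_cons, hstep]
    have hge := PySem.Chars.neg_one_le_find main.toList t.toList
    split_ifs with hc
    · rw [foldl_ffoStep_some]
      cases hm : ffoMin main.toList ts with
      | none =>
        simp only [ffoMin, hm]
        split_ifs <;> first | rfl | (simp_all; done) | (simp_all; omega) | (exfalso; omega)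
      | some p =>
        rcases p with ⟨m, f⟩
        simp only [ffoMin, hm]
        split_ifs <;> first | rfl | (simp_all; done) | (simp_all; omega) | (exfalso; omega)
    · rw [ih]
      cases hm : ffoMin main.toList ts with
      | none =>
        simp only [ffoMin, hm]
        split_ifs <;> first | rfl | (simp_all; done) | (simp_all; omega) | (exfalso; omega)
      | some p =>
        rcases p with ⟨m, f⟩
        simp only [ffoMin, hm]
        split_ifs <;> first | rfl | (simp_all; done) | (simp_all; omega) | (exfalso; omega)

theorem ffoMin_none (s : List Char) (ts : List String) :
    ffoMin s ts = none ↔ ∀ t ∈ ts, PySem.Chars.find s t.toList = -1 := by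
  induction ts with
  | nil => simp [ffoMin]
  | cons t ts ih =>
    simp only [ffoMin]
    cases h : ffoMin s ts with
    | none =>
      simp only []
      constructor
      · intro hcond
        split at hcond
        · intro u hu
          rcases List.mem_cons.mp hu with rfl | hu
          · assumption
          · exact (ih.mp h) u hu
        · exact absurd hcond (by simp)
      · intro hall
        simp [hall t (by simp)]
    | some p =>
      rcases p with ⟨m, f⟩
      simp only []
      constructor
      · intro hcond; exfalso; split_ifs at hcond <;> simp_all
      · intro hall
        exfalso
        have := ih.mpr (fun u hu => hall u (List.mem_cons_of_mem _ hu))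
        simp [h] at this

theorem ffoMin_some (s : List Char) (ts : List String) (m : Int) (f : String)
    (h : ffoMin s ts = some (m, f)) :
    PySem.Chars.find s f.toList = m ∧ m ≠ -1 ∧
      (∀ t ∈ ts, PySem.Chars.find s t.toList = -1 ∨ m ≤ PySem.Chars.find s t.toList) ∧
      ts.find? (fun t => PySem.Chars.find s t.toList == m) = some f := by
  induction ts generalizing m f with
  | nil => simp [ffoMin] at h
  | cons t ts ih =>
    simp only [ffoMin] at h
    by_cases hi : PySem.Chars.find s t.toList = -1
    · cases hm : ffoMin s ts with
      | none =>
        rw [hm] at h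
        dsimp only at h
        rw [if_pos hi] at h
        exact absurd h (by simp)
      | some p =>
        rcases p with ⟨m', f'⟩
        rw [hm] at h
        dsimp only at h
        rw [if_pos hi] at h
        obtain ⟨rfl, rfl⟩ : m' = m ∧ f' = f :=
          ⟨congrArg Prod.fst (Option.some.inj h), congrArg Prod.snd (Option.some.inj h)⟩
        obtain ⟨hf', hne', hall', hfind'⟩ := ih _ _ hm
        refine ⟨hf', hne', ?_, ?_⟩
        · intro u hu
          rcases List.mem_cons.mp hu with rfl | hu
          · left; exact hi
          · exact hall' u hu
        · rw [List.find?_cons]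
          have hfalse : (PySem.Chars.find s t.toList == m') = false := by
            simp only [beq_eq_false_iff_ne, ne_eq]; omega
          rw [hfalse]; exact hfind'
    · cases hm : ffoMin s ts with
      | none =>
        rw [hm] at h
        dsimp only at h
        rw [if_neg hi] at h
        obtain ⟨rfl, rfl⟩ : PySem.Chars.find s t.toList = m ∧ t = f :=
          ⟨congrArg Prod.fst (Option.some.inj h), congrArg Prod.snd (Option.some.inj h)⟩
        refine ⟨rfl, hi, ?_, by simp⟩
        intro u hu
        rcases List.mem_cons.mp hu with rfl | hu
        · right; exact le_refl _
        · left; exact (ffoMin_none s ts).mp hm u hu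
      | some p =>
        rcases p with ⟨m', f'⟩
        rw [hm] at h
        dsimp only at h
        rw [if_neg hi] at h
        obtain ⟨hf', hne', hall', hfind'⟩ := ih _ _ hm
        by_cases hle : PySem.Chars.find s t.toList ≤ m'
        · rw [if_pos hle] at h
          obtain ⟨rfl, rfl⟩ : PySem.Chars.find s t.toList = m ∧ t = f :=
            ⟨congrArg Prod.fst (Option.some.inj h), congrArg Prod.snd (Option.some.inj h)⟩
          refine ⟨rfl, hi, ?_, by simp⟩
          intro u hu
          rcases List.mem_cons.mp hu with rfl | hu
          · right; exact le_refl _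
          · rcases hall' u hu with h1 | h1
            · left; exact h1
            · right; omega
        · rw [if_neg hle] at h
          obtain ⟨rfl, rfl⟩ : m' = m ∧ f' = f :=
            ⟨congrArg Prod.fst (Option.some.inj h), congrArg Prod.snd (Option.some.inj h)⟩
          refine ⟨hf', hne', ?_, ?_⟩
          · intro u hu
            rcases List.mem_cons.mp hu with rfl | hu
            · right; omega
            · exact hall' u hu
          · rw [List.find?_cons]
            have hfalse : (PySem.Chars.find s t.toList == m') = false := by
              simp only [beq_eq_false_iff_ne, ne_eq]; omega
            rw [hfalse]; exact hfind'

-- a prefix of the i-th suffix means the target occurs, no later than i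
theorem find_le_of_prefix_drop (s : List Char) (t : String) (i : Nat)
    (h : t.toList <+: s.drop i) :
    PySem.Chars.find s t.toList ≠ -1 ∧ PySem.Chars.find s t.toList ≤ (i : Int) := by
  have hne : PySem.Chars.find s t.toList ≠ -1 := by
    rw [PySem.Chars.find_ne_neg_one_iff, ← PySem.Chars.isIn_iff_infix,
      ← PySem.Chars.exists_prefix_drop_iff_isIn]
    exact ⟨i, h⟩
  have hge : 0 ≤ PySem.Chars.find s t.toList := by
    have := PySem.Chars.neg_one_le_find s t.toList; omega
  have hspec := PySem.Chars.find_spec hge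
  refine ⟨hne, ?_⟩
  by_contra hlt
  rw [not_le] at hlt
  have hi : i < (PySem.Chars.find s t.toList).toNat := by omega
  exact hspec.2 i hi h

theorem ffoScan_append (s : List Char) (ts : List String) (l l' : List Nat)
    (h : ∀ i ∈ l, ts.find? (fun t => PySem.Chars.startswith (s.drop i) t.toList) = none) :
    ffoScan s ts (l ++ l') = ffoScan s ts l' := by
  induction l with
  | nil => rfl
  | cons i rest ih =>
    simp only [List.cons_append, ffoScan, h i (by simp)]
    exact ih (fun j hj => h j (by simp [hj]))

theorem find?_congr_mem {α : Type} (p q : α → Bool) (l : List α)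
    (h : ∀ x ∈ l, p x = q x) : l.find? p = l.find? q := by
  induction l with
  | nil => rfl
  | cons x xs ih =>
    simp only [List.find?_cons, h x (by simp)]
    cases q x <;> simp [ih (fun y hy => h y (by simp [hy]))]

theorem alt_eq_ffoMin (main : String) (ts : List String) :
    find_first_occurring_substring_alt main ts =
      match ffoMin main.toList ts with
      | some (_, f) => some f
      | none => none := by
  unfold find_first_occurring_substring_alt
  cases hm : ffoMin main.toList ts with
  | none =>
    have hall := (ffoMin_none _ _).mp hm
    have hnone : ∀ i : Nat,
        ts.find? (fun t => PySem.Chars.startswith (main.toList.drop i) t.toList) = none := by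
      intro i
      rw [List.find?_eq_none]
      intro t ht hsw
      have hpref := (PySem.Chars.startswith_iff _ _).mp hsw
      exact (find_le_of_prefix_drop _ _ _ hpref).1 (hall t ht)
    have hscan : ∀ l, ffoScan main.toList ts l = none := by
      intro l; induction l with
      | nil => rfl
      | cons i r ih => simp [ffoScan, hnone i, ih]
    exact hscan _
  | some p =>
    rcases p with ⟨m, f⟩
    obtain ⟨hf, hne, hall, hfind⟩ := ffoMin_some _ _ _ _ hm
    have hge : 0 ≤ m := by
      have := PySem.Chars.neg_one_le_find main.toList f.toList; omega
    have hmlen : m ≤ (main.toList.length : Int) := by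
      have := PySem.Chars.find_le_length main.toList f.toList; omega
    have hskip : ∀ i ∈ List.range m.toNat,
        ts.find? (fun t => PySem.Chars.startswith (main.toList.drop i) t.toList) = none := by
      intro i hi
      rw [List.find?_eq_none]
      intro t ht hsw
      have hpref := (PySem.Chars.startswith_iff _ _).mp hsw
      obtain ⟨hne2, hle2⟩ := find_le_of_prefix_drop main.toList t i hpref
      have hilt := List.mem_range.mp hi
      rcases hall t ht with h1 | h1
      · exact hne2 h1
      · omega
    have hrange : List.range (main.toList.length + 1) =
        List.range m.toNat ++
          List.map (fun x => m.toNat + x) (List.range (main.toList.length + 1 - m.toNat)) := by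
      rw [← List.range_add]; congr 1; omega
    rw [hrange, ffoScan_append main.toList ts _ _ hskip]
    have h2 : main.toList.length + 1 - m.toNat = (main.toList.length - m.toNat) + 1 := by omega
    rw [h2, List.range_succ_eq_map]
    simp only [List.map_cons, Nat.add_zero]
    have hpred : ts.find? (fun t => PySem.Chars.startswith (main.toList.drop m.toNat) t.toList)
        = some f := by
      rw [find?_congr_mem _ (fun t => PySem.Chars.find main.toList t.toList == m)]
      · exact hfind
      · intro t ht
        by_cases heq : PySem.Chars.find main.toList t.toList = m
        · have hsp := PySem.Chars.find_spec (s := main.toList) (sub := t.toList)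
            (by rw [heq]; exact hge)
          have hpref : t.toList <+: main.toList.drop m.toNat := by
            have := hsp.1; rwa [heq] at this
          simp [PySem.Chars.startswith_iff, hpref, heq]
        · have hfa : PySem.Chars.startswith (main.toList.drop m.toNat) t.toList = false := by
            rw [Bool.eq_false_iff]; intro hsw
            have hpref := (PySem.Chars.startswith_iff _ _).mp hsw
            obtain ⟨hne2, hle2⟩ := find_le_of_prefix_drop main.toList t m.toNat hpref
            rcases hall t ht with h1 | h1
            · exact hne2 h1
            · exact heq (by omega)
          simp [hfa, heq]
    simp [ffoScan, hpred]

-- ===== VERDICT (by name: the statement is the Claim_ definition above) =====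
theorem find_first_occurring_substring_spec : Claim_equal_find_first_occurring_substring := by
  intro main ts _
  show _ = _
  rw [find_first_occurring_substring, foldl_ffoStep_none, alt_eq_ffoMin]
  cases h : ffoMin main.toList ts with
  | none => rfl
  | some p => cases p; rfl
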